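-- pv_equiv track=rewrite | github.com/stacy-lee/Data-Mining | FrequentItemsetMining.py | find_freq_one_item
-- ===== SOURCE A (Python) =====
-- def find_freq_one_item(dataSet):
--     C1 = []
--     for transaction in dataSet:
--         for item in transaction:
--             if not [item] in C1:
--                 C1.append([item])
--     C1.sort()
--     return list(map(frozenset, C1))
-- ===== SOURCE B (Python) =====
-- def find_freq_one_item(dataSet):
--     items = [x for t in dataSet for x in t]
--     items.sort()
--     uniq = []
--     for x in items:
--         if not uniq or uniq[-1] != x:
--             uniq.append(x)
--     return [frozenset([x]) for x in uniq]
-- ===== Notes on version B (the rewrite author's own statement) =====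
-- stated objective: faster
-- what changed: A scans the growing candidate list for every item (quadratic membership tests, then sorts); B flattens all transactions into one list, sorts it once, and removes duplicates in a single adjacent-comparison pass.
import Mathlib
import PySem

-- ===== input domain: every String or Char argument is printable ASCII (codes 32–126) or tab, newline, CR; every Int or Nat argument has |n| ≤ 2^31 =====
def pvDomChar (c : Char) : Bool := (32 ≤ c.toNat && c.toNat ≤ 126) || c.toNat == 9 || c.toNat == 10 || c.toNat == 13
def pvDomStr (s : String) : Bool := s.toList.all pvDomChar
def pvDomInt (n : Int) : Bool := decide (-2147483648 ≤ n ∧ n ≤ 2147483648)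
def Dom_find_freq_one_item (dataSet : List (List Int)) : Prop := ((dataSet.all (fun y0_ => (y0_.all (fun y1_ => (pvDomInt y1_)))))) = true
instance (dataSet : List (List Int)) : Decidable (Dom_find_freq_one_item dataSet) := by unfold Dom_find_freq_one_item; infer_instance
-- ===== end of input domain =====

-- B replaces A's repeated membership scans of the growing candidate list with flatten, one sort, and a single adjacent-comparison dedup pass (faster).

-- ===== PORT A =====
def find_freq_one_item (dataSet : List (List Int)) : List (List Int) :=
  let C1 := dataSet.foldl (fun C1 transaction =>
      transaction.foldl (fun C1 item =>
        if [item] ∈ C1 then C1 else C1 ++ [[item]]) C1) []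
  (PySem.List.sorted C1 (fun l => l) false).map (fun l => PySem.Set.ofList l)

-- ===== PORT B =====
def find_freq_one_item_alt (dataSet : List (List Int)) : List (List Int) :=
  let items := PySem.List.sorted (dataSet.flatMap (fun t => t)) (fun x => x) false
  let uniq := items.foldl (fun uniq x =>
      if uniq = [] ∨ uniq.getLast? ≠ some x then uniq ++ [x] else uniq) []
  uniq.map (fun x => PySem.Set.ofList [x])

-- ===== PRECONDITION & SPEC =====
def Spec_find_freq_one_item (dataSet : List (List Int)) (out : List (List Int)) : Prop := out = find_freq_one_item_alt dataSet
instance (dataSet : List (List Int)) (out : List (List Int)) : Decidable (Spec_find_freq_one_item dataSet out) := by unfold Spec_find_freq_one_item; infer_instance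

-- ===== CLAIM (what is proved, stated in full; the proofs are below) =====
def Claim_equal_find_freq_one_item : Prop := ∀ (dataSet : List (List Int)), Dom_find_freq_one_item dataSet → Spec_find_freq_one_item dataSet (find_freq_one_item dataSet)

-- ===== LEMMAS AND PROOFS =====

-- A's membership-test accumulation, on bare Ints.
def dedupF (xs acc : List Int) : List Int :=
  xs.foldl (fun a x => if x ∈ a then a else a ++ [x]) acc

-- A's inner loop over singleton lists is dedupF under `fun x => [x]`.
theorem foldA_inner_map (t : List Int) : ∀ acc : List Int,
    t.foldl (fun C1 item => if [item] ∈ C1 then C1 else C1 ++ [[item]])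
      (acc.map (fun x => [x])) = (dedupF t acc).map (fun x => [x]) := by
  induction t with
  | nil => intro acc; rfl
  | cons x t ih =>
    intro acc
    have hmem : ([x] ∈ acc.map (fun y => ([y] : List Int))) ↔ x ∈ acc := by
      simp [List.mem_map]
    by_cases hx : x ∈ acc
    · simp only [List.foldl_cons, if_pos (hmem.mpr hx)]
      simpa [dedupF, List.foldl_cons, hx] using ih acc
    · have hnm : ¬ ([x] ∈ acc.map (fun y => ([y] : List Int))) := fun h => hx (hmem.mp h)
      simp only [List.foldl_cons, if_neg hnm]
      have h2 := ih (acc ++ [x])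
      simp only [List.map_append] at h2
      simpa [dedupF, List.foldl_cons, hx] using h2

theorem foldA_outer (dataSet : List (List Int)) : ∀ acc : List Int,
    dataSet.foldl (fun C1 transaction =>
        transaction.foldl (fun C1 item => if [item] ∈ C1 then C1 else C1 ++ [[item]]) C1)
      (acc.map (fun x => [x]))
      = (dedupF (dataSet.flatMap (fun t => t)) acc).map (fun x => [x]) := by
  induction dataSet with
  | nil => intro acc; rfl
  | cons t ds ih =>
    intro acc
    simp only [List.foldl_cons, List.flatMap_cons]
    rw [foldA_inner_map t acc, ih (dedupF t acc)]
    simp [dedupF, List.foldl_append]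

theorem mem_dedupF (xs : List Int) : ∀ acc y, y ∈ dedupF xs acc ↔ y ∈ acc ∨ y ∈ xs := by
  induction xs with
  | nil => intro acc y; simp [dedupF]
  | cons x t ih =>
    intro acc y
    by_cases hx : x ∈ acc
    · have h := ih acc y
      simp only [dedupF, List.foldl_cons, if_pos hx] at *
      rw [h]
      constructor
      · rintro (h | h)
        · exact Or.inl h
        · exact Or.inr (List.mem_cons_of_mem _ h)
      · rintro (h | h)
        · exact Or.inl h
        · rcases List.mem_cons.mp h with h | h
          · exact Or.inl (h ▸ hx)
          · exact Or.inr h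
    · have h := ih (acc ++ [x]) y
      simp only [dedupF, List.foldl_cons, if_neg hx] at *
      rw [h]
      simp [List.mem_append, List.mem_cons]
      tauto

theorem nodup_dedupF (xs : List Int) : ∀ acc, acc.Nodup → (dedupF xs acc).Nodup := by
  induction xs with
  | nil => intro acc h; exact h
  | cons x t ih =>
    intro acc h
    by_cases hx : x ∈ acc
    · simpa [dedupF, List.foldl_cons, hx] using ih acc h
    · have h2 : (acc ++ [x]).Nodup := by
        simp [List.nodup_append, h]
        intro a ha hax
        exact hx (hax ▸ ha)
      simpa [dedupF, List.foldl_cons, hx] using ih (acc ++ [x]) h2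

-- In a strictly increasing list every element is ≤ the last one.
theorem le_getLast_of_pairwise : ∀ (acc : List Int), acc.Pairwise (· < ·) →
    ∀ l, acc.getLast? = some l → ∀ a ∈ acc, a ≤ l := by
  intro acc
  induction acc with
  | nil => intro _ l hl; simp at hl
  | cons b bs ih =>
    intro h l hl a ha
    cases bs with
    | nil =>
      simp at hl ha
      omega
    | cons c cs =>
      rw [List.getLast?_cons_cons] at hl
      have hbl : b < l := by
        have hlm : l ∈ c :: cs := List.mem_of_getLast? hl
        exact List.rel_of_pairwise_cons h hlm
      rcases List.mem_cons.mp ha with rfl | ha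
      · exact le_of_lt hbl
      · exact ih h.tail l hl a ha

-- B's adjacent-dedup loop: invariant on a strictly increasing accumulator.
theorem foldB_inv (items : List Int) : ∀ acc : List Int,
    acc.Pairwise (· < ·) → items.Pairwise (· ≤ ·) →
    (∀ a ∈ acc, ∀ x ∈ items, a ≤ x) →
    (items.foldl (fun uniq x =>
        if uniq = [] ∨ uniq.getLast? ≠ some x then uniq ++ [x] else uniq) acc).Pairwise (· < ·)
    ∧ (∀ y, y ∈ items.foldl (fun uniq x =>
        if uniq = [] ∨ uniq.getLast? ≠ some x then uniq ++ [x] else uniq) acc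
        ↔ y ∈ acc ∨ y ∈ items) := by
  induction items with
  | nil => intro acc h _ _; exact ⟨h, by simp⟩
  | cons x t ih =>
    intro acc hacc hitems hle
    have htt : t.Pairwise (· ≤ ·) := hitems.tail
    have hxt : ∀ y ∈ t, x ≤ y := fun y hy => List.rel_of_pairwise_cons hitems hy
    by_cases hc : acc = [] ∨ acc.getLast? ≠ some x
    · have hax : ∀ a ∈ acc, a < x := by
        intro a ha
        have hne : acc ≠ [] := by intro h; subst h; cases ha
        obtain ⟨l, hl⟩ : ∃ l, acc.getLast? = some l := by
          cases acc with
          | nil => exact absurd rfl hne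
          | cons u us => exact ⟨_, List.getLast?_eq_some_getLast (by simp)⟩
        have hlx : l ≠ x := by
          rcases hc with hc | hc
          · exact absurd hc hne
          · intro h; exact hc (h ▸ hl)
        have hlm : l ∈ acc := List.mem_of_getLast? hl
        have hlex : l ≤ x := hle l hlm x (List.mem_cons_self)
        have hal : a ≤ l := le_getLast_of_pairwise acc hacc l hl a ha
        omega
      have hacc2 : (acc ++ [x]).Pairwise (· < ·) := by
        rw [List.pairwise_append]
        exact ⟨hacc, by simp, by simpa using hax⟩
      have hle2 : ∀ a ∈ acc ++ [x], ∀ y ∈ t, a ≤ y := by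
        intro a ha y hy
        rcases List.mem_append.mp ha with ha | ha
        · exact hle a ha y (List.mem_cons_of_mem _ hy)
        · simp at ha; exact ha ▸ hxt y hy
      have := ih (acc ++ [x]) hacc2 htt hle2
      refine ⟨?_, ?_⟩
      · simpa [List.foldl_cons, if_pos hc] using this.1
      · intro y
        rw [List.foldl_cons, if_pos hc, this.2 y]
        simp [List.mem_append, List.mem_cons]
        tauto
    · push_neg at hc
      have hxm : x ∈ acc := List.mem_of_getLast? hc.2
      have hle2 : ∀ a ∈ acc, ∀ y ∈ t, a ≤ y :=
        fun a ha y hy => hle a ha y (List.mem_cons_of_mem _ hy)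
      have hcond : ¬ (acc = [] ∨ acc.getLast? ≠ some x) := by
        push_neg; exact hc
      have := ih acc hacc htt hle2
      refine ⟨?_, ?_⟩
      · simpa [List.foldl_cons, if_neg hcond] using this.1
      · intro y
        rw [List.foldl_cons, if_neg hcond, this.2 y]
        constructor
        · rintro (h | h)
          · exact Or.inl h
          · exact Or.inr (List.mem_cons_of_mem _ h)
        · rintro (h | h)
          · exact Or.inl h
          · rcases List.mem_cons.mp h with rfl | h
            · exact Or.inl hxm
            · exact Or.inr h

-- Lexicographic order on singleton Int lists is the Int order.
theorem singleton_lex_lt (a b : Int) (h : a < b) : (([a] : List Int) < [b]) :=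
  List.Lex.rel h

-- ===== VERDICT (by name: the statement is the Claim_ definition above) =====
theorem find_freq_one_item_spec : Claim_equal_find_freq_one_item := by
  intro dataSet _
  unfold Spec_find_freq_one_item find_freq_one_item find_freq_one_item_alt
  simp only []
  have hA := foldA_outer dataSet []
  simp only [List.map_nil] at hA
  rw [hA]
  set flat := dataSet.flatMap (fun t => t) with hflat
  set S := dedupF flat [] with hS
  have hSnd : S.Nodup := nodup_dedupF flat [] List.nodup_nil
  have hSmem : ∀ y, y ∈ S ↔ y ∈ flat := by
    intro y; rw [hS, mem_dedupF flat [] y]; simp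
  set items := PySem.List.sorted flat (fun x => x) false with hitems
  have hPW : items.Pairwise (· ≤ ·) := by
    simpa using PySem.List.sorted_pairwise flat (fun x => x)
  obtain ⟨hUPW, hUmem⟩ := foldB_inv items [] (by simp) hPW (by simp)
  set uniq := items.foldl (fun uniq x =>
      if uniq = [] ∨ uniq.getLast? ≠ some x then uniq ++ [x] else uniq) [] with huniq
  have hUnd : uniq.Nodup := hUPW.imp (fun h => ne_of_lt h)
  have hperm : (uniq.map (fun x => ([x] : List Int))).Perm (S.map (fun x => [x])) := by
    refine List.Perm.map _ ?_
    refine (List.perm_ext_iff_of_nodup hUnd hSnd).mpr ?_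
    intro y
    rw [hSmem y, hUmem y, hitems]
    simp [PySem.List.mem_sorted]
  have hpw : (uniq.map (fun x => ([x] : List Int))).Pairwise (fun a b => a < b) := by
    rw [List.pairwise_map]
    exact hUPW.imp (fun h => singleton_lex_lt _ _ h)
  have hinst : PySem.List.sorted (S.map (fun x => ([x] : List Int))) (fun l => l) false
      = @PySem.List.sorted _ _ List.instLinearOrder.toLT LinearOrder.toDecidableLT
          (S.map (fun x => ([x] : List Int))) (fun l => l) false := by
    congr 1
  rw [hinst,
    PySem.List.sorted_eq_of_perm_of_pairwise_lt _ _ (fun l => l) hperm hpw]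
  simp [List.map_map, Function.comp]
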